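-- pv_equiv track=rewrite | github.com/blzzua/codewars | 6-kyu/simple_fun_191_sum_of_regular_numbers.py | sum_of_regular_numbers
-- ===== SOURCE A (Python) =====
-- from itertools import groupby
--
-- def sum_of_regular_numbers(arr):
--     groups = [list(data) for g, data in groupby(zip(arr,arr[1:]) , lambda x: x[1]- x[0])]
--     res = 0
--     for lst in groups:
--         if len(lst) == 1:
--             continue
--         res += sum([b + a*int(1-bool(i)) for i, (a,b) in enumerate(lst)])
--     return res
-- ===== SOURCE B (Python) =====
-- def sum_of_regular_numbers(arr):
--     # One pass with run accumulators instead of groupby + per-group comprehensions.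
--     if len(arr) < 2:
--         return 0
--     acc = 0
--     d = arr[1] - arr[0]
--     run_sum = arr[0] + arr[1]
--     length = 2
--     prev = arr[1]
--     for x in arr[2:]:
--         if x - prev == d:
--             run_sum += x
--             length += 1
--         else:
--             if length >= 3:
--                 acc += run_sum
--             d = x - prev
--             run_sum = prev + x
--             length = 2
--         prev = x
--     if length >= 3:
--         acc += run_sum
--     return acc
-- ===== Notes on version B (the rewrite author's own statement) =====
-- stated objective: simpler
-- what changed: Replaces itertools.groupby over the zipped pair list plus a per-group enumerate-comprehension with a single explicit scan that maintains the current run's difference, element sum and length, flushing the sum whenever a run of length >= 3 ends.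
import Mathlib
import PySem

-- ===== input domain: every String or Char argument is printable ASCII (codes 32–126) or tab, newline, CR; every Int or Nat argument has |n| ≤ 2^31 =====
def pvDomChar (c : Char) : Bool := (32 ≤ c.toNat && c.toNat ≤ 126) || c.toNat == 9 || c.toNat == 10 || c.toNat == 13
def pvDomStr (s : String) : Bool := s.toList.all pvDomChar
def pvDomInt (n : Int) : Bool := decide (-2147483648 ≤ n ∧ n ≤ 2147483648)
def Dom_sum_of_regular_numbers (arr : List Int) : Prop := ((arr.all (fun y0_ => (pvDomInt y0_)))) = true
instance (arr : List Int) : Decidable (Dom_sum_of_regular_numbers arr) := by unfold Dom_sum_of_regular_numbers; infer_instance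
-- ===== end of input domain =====

-- B replaces groupby-over-pairs + per-group comprehensions by one explicit scan with run accumulators (objective: simpler).

-- ===== PORT A =====
-- itertools.groupby(pairs, key = diff): consecutive grouping; cur holds the current group reversed
def pvGrp (d : Int) (cur : List (Int × Int)) : List (Int × Int) → List (List (Int × Int))
  | [] => [cur.reverse]
  | p :: ps => if p.2 - p.1 = d then pvGrp d (p :: cur) ps else cur.reverse :: pvGrp (p.2 - p.1) [p] ps

def pvGroups : List (Int × Int) → List (List (Int × Int))
  | [] => []
  | p :: ps => pvGrp (p.2 - p.1) [p] ps

-- sum([b + a*int(1-bool(i)) for i,(a,b) in enumerate(lst)]);  int(1-bool(i)) = 1 iff i == 0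
def pvSumExpr (lst : List (Int × Int)) : Int :=
  ((PySem.List.enumerate lst).map (fun q => q.2.2 + q.2.1 * (if q.1 = 0 then 1 else 0))).sum

def sum_of_regular_numbers (arr : List Int) : Int :=
  (pvGroups (arr.zip (arr.drop 1))).foldl
    (fun res lst => if lst.length = 1 then res else res + pvSumExpr lst) 0

-- ===== PORT B =====
-- loop over arr[2:] with state (acc, d, run_sum, length, prev)
def pvAltLoop (acc d runSum len prev : Int) : List Int → Int
  | [] => if 3 ≤ len then acc + runSum else acc
  | x :: xs =>
    if x - prev = d then pvAltLoop acc d (runSum + x) (len + 1) x xs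
    else pvAltLoop (if 3 ≤ len then acc + runSum else acc) (x - prev) (prev + x) 2 x xs

def sum_of_regular_numbers_alt : List Int → Int
  | a0 :: a1 :: rest => pvAltLoop 0 (a1 - a0) (a0 + a1) 2 a1 rest
  | _ => 0

-- ===== PRECONDITION & SPEC =====
def Spec_sum_of_regular_numbers (arr : List Int) (out : Int) : Prop := out = sum_of_regular_numbers_alt arr
instance (arr : List Int) (out : Int) : Decidable (Spec_sum_of_regular_numbers arr out) := by unfold Spec_sum_of_regular_numbers; infer_instance

-- ===== CLAIM (what is proved, stated in full; the proofs are below) =====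
def Claim_equal_sum_of_regular_numbers : Prop := ∀ (arr : List Int), Dom_sum_of_regular_numbers arr → Spec_sum_of_regular_numbers arr (sum_of_regular_numbers arr)

-- ===== LEMMAS AND PROOFS =====

-- A's per-group step of the outer for-loop
def pvStep (res : Int) (lst : List (Int × Int)) : Int :=
  if lst.length = 1 then res else res + pvSumExpr lst

-- B's run value reconstructed from A's (reversed) current group
def pvVal (cur : List (Int × Int)) : Int :=
  cur.getLast?.elim 0 Prod.fst + (cur.map Prod.snd).sum

theorem pvSumExpr_tail (t : List (Int × Int)) (s : Int) (hs : 1 ≤ s) :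
    ((PySem.List.enumerate t s).map (fun q => q.2.2 + q.2.1 * (if q.1 = 0 then 1 else 0))).sum
      = (t.map Prod.snd).sum := by
  induction t generalizing s with
  | nil => rw [PySem.List.enumerate_nil]; rfl
  | cons p t ih =>
    have hne : s ≠ 0 := by omega
    rw [PySem.List.enumerate_cons, List.map_cons, List.sum_cons, ih (s + 1) (by omega),
      List.map_cons, List.sum_cons, if_neg hne]
    ring

theorem pvSumExpr_cons (a b : Int) (t : List (Int × Int)) :
    pvSumExpr ((a, b) :: t) = a + b + (t.map Prod.snd).sum := by
  unfold pvSumExpr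
  rw [PySem.List.enumerate_cons, List.map_cons, List.sum_cons, show (0 : Int) + 1 = 1 from rfl,
    pvSumExpr_tail t 1 le_rfl]
  norm_num
  ring

theorem pvSumExpr_ne_nil (lst : List (Int × Int)) (h : lst ≠ []) :
    pvSumExpr lst = lst.head?.elim 0 Prod.fst + (lst.map Prod.snd).sum := by
  cases lst with
  | nil => exact absurd rfl h
  | cons p t => cases p; simp [pvSumExpr_cons]; ring

theorem pvSumExpr_reverse_eq_val (cur : List (Int × Int)) (h : cur ≠ []) :
    pvSumExpr cur.reverse = pvVal cur := by
  rw [pvSumExpr_ne_nil cur.reverse (by simpa using h)]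
  simp [pvVal, List.head?_reverse]

theorem pvStep_reverse (cur : List (Int × Int)) (res : Int) (h : cur ≠ []) :
    pvStep res cur.reverse = if 3 ≤ (cur.length : Int) + 1 then res + pvVal cur else res := by
  cases cur with
  | nil => exact absurd rfl h
  | cons c cs =>
    cases cs with
    | nil =>
      simp [pvStep]
    | cons c' cs' =>
      rw [pvStep, if_neg (by simp), if_pos (by simp only [List.length_cons]; push_cast; omega)]
      rw [pvSumExpr_reverse_eq_val _ (by simp)]

theorem pvVal_cons (p : Int × Int) (c : Int × Int) (cs : List (Int × Int)) :
    pvVal (p :: c :: cs) = pvVal (c :: cs) + p.2 := by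
  simp [pvVal, List.getLast?_cons_cons]
  ring

theorem pvMain (xs : List Int) :
    ∀ (d : Int) (cur : List (Int × Int)) (res prev : Int), cur ≠ [] →
    (pvGrp d cur ((prev :: xs).zip xs)).foldl pvStep res
      = pvAltLoop res d (pvVal cur) ((cur.length : Int) + 1) prev xs := by
  induction xs with
  | nil =>
    intro d cur res prev h
    simp only [List.zip_nil_right, pvGrp, List.foldl, pvAltLoop]
    exact pvStep_reverse cur res h
  | cons x xs ih =>
    intro d cur res prev h
    have hz : (prev :: x :: xs).zip (x :: xs) = (prev, x) :: (x :: xs).zip xs := by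
      simp
    rw [hz, pvGrp, pvAltLoop]
    by_cases hd : x - prev = d
    · simp only [hd, if_true]
      cases cur with
      | nil => exact absurd rfl h
      | cons c cs =>
        rw [ih d ((prev, x) :: c :: cs) res x (by simp)]
        rw [pvVal_cons]
        have : ((((prev, x) :: c :: cs).length : Int) + 1) = ((c :: cs).length : Int) + 1 + 1 := by
          push_cast [List.length_cons]; ring
        rw [this]
    · simp only [if_neg hd]
      rw [List.foldl_cons, ih (x - prev) [(prev, x)] (pvStep res cur.reverse) x (by simp)]
      rw [pvStep_reverse cur res h]
      simp [pvVal]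

-- ===== VERDICT (by name: the statement is the Claim_ definition above) =====
theorem sum_of_regular_numbers_spec : Claim_equal_sum_of_regular_numbers := by
  intro arr _
  unfold Spec_sum_of_regular_numbers
  match arr with
  | [] => rfl
  | [a] => rfl
  | a0 :: a1 :: rest =>
    show (pvGroups ((a0 :: a1 :: rest).zip ((a0 :: a1 :: rest).drop 1))).foldl pvStep 0
        = pvAltLoop 0 (a1 - a0) (a0 + a1) 2 a1 rest
    have hz : (a0 :: a1 :: rest).zip ((a0 :: a1 :: rest).drop 1)
        = (a0, a1) :: (a1 :: rest).zip rest := by simp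
    rw [hz]
    show (pvGrp (a1 - a0) [(a0, a1)] ((a1 :: rest).zip rest)).foldl pvStep 0
        = pvAltLoop 0 (a1 - a0) (a0 + a1) 2 a1 rest
    rw [pvMain rest (a1 - a0) [(a0, a1)] 0 a1 (by simp)]
    simp [pvVal]
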